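-- pv_equiv track=rewrite | github.com/simgeekiz/ApplabAPI | group2api/utils/moment.py | filter_all_but_second
-- ===== SOURCE A (Python) =====
-- def filter_all_but_second(answers, exercise_ids):
--     exercises_processed = []
--     exercises_processed_twice = []
--     return_answers = []
--     for i in range(len(answers)):
--         if exercise_ids[i] not in exercises_processed:
--             exercises_processed.append(exercise_ids[i])
--         else:
--             if exercise_ids[i] not in exercises_processed_twice:
--                 return_answers.append(answers[i])
--                 exercises_processed_twice.append(exercise_ids[i])
--     return return_answers
-- ===== SOURCE B (Python) =====
-- def filter_all_but_second(answers, exercise_ids):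
--     positions = {}
--     for i in range(len(answers)):
--         eid = exercise_ids[i]
--         positions[eid] = positions.get(eid, []) + [i]
--     seconds = sorted(idxs[1] for idxs in positions.values() if len(idxs) >= 2)
--     return [answers[i] for i in seconds]
-- ===== Notes on version B (the rewrite author's own statement) =====
-- stated objective: faster
-- what changed: Replaces the stateful one-pass with two membership-tracking lists (a linear 'in' scan per element) by a staged group-then-select-then-reorder algorithm: build an index-list per exercise_id in a dict, take each group's second index, sort those indices to restore order, and read the answers off at them.
import Mathlib
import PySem

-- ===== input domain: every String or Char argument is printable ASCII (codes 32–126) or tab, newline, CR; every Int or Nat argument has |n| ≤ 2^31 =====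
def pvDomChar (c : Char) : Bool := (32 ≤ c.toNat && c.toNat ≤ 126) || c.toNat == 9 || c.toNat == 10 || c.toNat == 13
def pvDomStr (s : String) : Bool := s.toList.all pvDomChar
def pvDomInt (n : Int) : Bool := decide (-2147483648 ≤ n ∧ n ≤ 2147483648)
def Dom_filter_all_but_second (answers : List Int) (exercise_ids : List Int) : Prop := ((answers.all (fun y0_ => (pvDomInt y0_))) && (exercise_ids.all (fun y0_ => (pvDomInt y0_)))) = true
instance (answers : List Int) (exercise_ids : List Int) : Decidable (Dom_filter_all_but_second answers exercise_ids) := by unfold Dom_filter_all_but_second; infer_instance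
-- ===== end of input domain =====

-- B replaces A's stateful one-pass (two membership lists) by a staged algorithm: group indices per id, take each group's second index, sort, and read answers off; equivalence proved on return values.


-- ===== PORT A =====
-- loop body of A: two tracking lists (processed, processed_twice, return_answers)
def fabsStepA (answers : List Int) (exercise_ids : List Int)
    (st : List Int × List Int × List Int) (i : Int) : List Int × List Int × List Int :=
  let eid := PySem.List.pyGetD exercise_ids i 0
  if !(st.1.contains eid) then (st.1 ++ [eid], st.2.1, st.2.2)
  else if !(st.2.1.contains eid) then
    (st.1, st.2.1 ++ [eid], st.2.2 ++ [PySem.List.pyGetD answers i 0])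
  else st

def filter_all_but_second (answers : List Int) (exercise_ids : List Int) : List Int :=
  ((PySem.List.pyRange 0 (answers.length : Int) 1).foldl
    (fabsStepA answers exercise_ids) ([], [], [])).2.2

-- ===== PORT B =====
-- grouping loop of B: positions[eid] = positions.get(eid, []) + [i]
def fabsAltStep (exercise_ids : List Int)
    (d : PySem.Dict Int (List Int)) (i : Int) : PySem.Dict Int (List Int) :=
  d.modify (PySem.List.pyGetD exercise_ids i 0) [] (fun l => l ++ [i])

def filter_all_but_second_alt (answers : List Int) (exercise_ids : List Int) : List Int :=
  let positions := (PySem.List.pyRange 0 (answers.length : Int) 1).foldl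
    (fabsAltStep exercise_ids) PySem.Dict.empty
  let seconds := PySem.List.sorted
    ((positions.values.filter (fun idxs => decide (2 ≤ idxs.length))).map
      (fun idxs => PySem.List.pyGetD idxs 1 0)) (fun x => x)
  seconds.map (fun i => PySem.List.pyGetD answers i 0)

-- ===== PRECONDITION & SPEC =====
-- A (and B) raise IndexError reading exercise_ids[i] when answers is longer than exercise_ids.
def Pre_filter_all_but_second (answers : List Int) (exercise_ids : List Int) : Prop :=
  answers.length ≤ exercise_ids.length
instance (answers : List Int) (exercise_ids : List Int) : Decidable (Pre_filter_all_but_second answers exercise_ids) := by unfold Pre_filter_all_but_second; infer_instance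
def pvWitness_filter_all_but_second : List Int × List Int := ([10, 20, 30], [7, 7, 8])

def Spec_filter_all_but_second (answers : List Int) (exercise_ids : List Int) (out : List Int) : Prop := out = filter_all_but_second_alt answers exercise_ids
instance (answers : List Int) (exercise_ids : List Int) (out : List Int) : Decidable (Spec_filter_all_but_second answers exercise_ids out) := by unfold Spec_filter_all_but_second; infer_instance

-- ===== CLAIM (what is proved, stated in full; the proofs are below) =====
def Claim_equal_filter_all_but_second : Prop := ∀ (answers : List Int) (exercise_ids : List Int), Dom_filter_all_but_second answers exercise_ids → Pre_filter_all_but_second answers exercise_ids → Spec_filter_all_but_second answers exercise_ids (filter_all_but_second answers exercise_ids)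

-- ===== LEMMAS AND PROOFS =====

-- Nat-index reading of the inputs: e j = exercise_ids[j], occ = indices carrying key k,
-- cnt j = occurrences of key e j strictly before j, T = indices that are a second occurrence.
def fabsE (ids : List Int) (j : Nat) : Int := ids.getD j 0
def fabsOcc (ids : List Int) (n : Nat) (k : Int) : List Nat :=
  (List.range n).filter (fun j => fabsE ids j == k)
def fabsCnt (ids : List Int) (j : Nat) : Nat :=
  (List.range j).countP (fun i => fabsE ids i == fabsE ids j)
def fabsT (ids : List Int) (n : Nat) : List Nat :=
  (List.range n).filter (fun j => fabsCnt ids j == 1)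
def fabsK2 (ids : List Int) (n : Nat) : List Int :=
  (PySem.Set.ofList ((List.range n).map (fabsE ids))).filter
    (fun k => decide (2 ≤ (fabsOcc ids n k).length))

-- the element of (range n).filter p sitting right after the p-elements below j is j itself
theorem fabs_getD_filter_range (p : Nat → Bool) {n j : Nat} (hj : j < n) (hp : p j = true) :
    ((List.range n).filter p).getD ((List.range j).countP p) 0 = j := by
  induction n with
  | zero => omega
  | succ n ih =>
    rw [List.range_succ, List.filter_append]
    by_cases hjn : j < n
    · have hlt : (List.range j).countP p < ((List.range n).filter p).length := by
        rw [← List.countP_eq_length_filter]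
        have h1 : (List.range (j + 1)).countP p ≤ (List.range n).countP p :=
          List.Sublist.countP_le (List.range_sublist.mpr hjn)
        rw [List.range_succ, List.countP_append] at h1
        simp [hp] at h1; omega
      rw [List.getD_append _ _ _ _ hlt]
      exact ih hjn
    · have hje : j = n := by omega
      subst hje
      have hlen : ((List.range j).filter p).length = (List.range j).countP p := by
        rw [← List.countP_eq_length_filter]
      rw [List.getD_append_right _ _ _ _ hlen.le]
      simp [hp, hlen]

-- converse: the i-th element of the filtered range has exactly i p-indices below it
theorem fabs_countP_range_getElem (p : Nat → Bool) {n i : Nat}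
    (h : i < ((List.range n).filter p).length) :
    (List.range (((List.range n).filter p)[i])).countP p = i := by
  have hmem : ((List.range n).filter p)[i] ∈ (List.range n).filter p := List.getElem_mem h
  have hj : ((List.range n).filter p)[i] < n ∧ p (((List.range n).filter p)[i]) = true := by
    have := List.mem_filter.mp hmem
    exact ⟨List.mem_range.mp this.1, this.2⟩
  have hlt : (List.range (((List.range n).filter p)[i])).countP p
      < ((List.range n).filter p).length := by
    rw [← List.countP_eq_length_filter]
    have h1 : (List.range ((((List.range n).filter p)[i]) + 1)).countP p
        ≤ (List.range n).countP p :=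
      List.Sublist.countP_le (List.range_sublist.mpr hj.1)
    rw [List.range_succ, List.countP_append] at h1
    simp [hj.2] at h1; omega
  have hg : ((List.range n).filter p).getD
      ((List.range (((List.range n).filter p)[i])).countP p) 0
      = ((List.range n).filter p)[i] :=
    fabs_getD_filter_range p hj.1 hj.2
  rw [List.getD_eq_getElem _ 0 hlt] at hg
  have hnd : ((List.range n).filter p).Nodup :=
    (List.pairwise_lt_range.filter p).imp Nat.ne_of_lt
  exact hnd.getElem_inj_iff.mp hg

theorem fabs_mem_T (ids : List Int) (n j : Nat) :
    j ∈ fabsT ids n ↔ j < n ∧ fabsCnt ids j = 1 := by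
  simp [fabsT, List.mem_filter, List.mem_range]

-- a second occurrence j is occ(e j)[1], and its key's group has ≥ 2 members
theorem fabs_T_second (ids : List Int) (n : Nat) {j : Nat} (hj : j ∈ fabsT ids n) :
    2 ≤ (fabsOcc ids n (fabsE ids j)).length ∧ (fabsOcc ids n (fabsE ids j)).getD 1 0 = j := by
  obtain ⟨hjn, hc⟩ := (fabs_mem_T ids n j).mp hj
  set p : Nat → Bool := fun i => fabsE ids i == fabsE ids j with hp
  have hpj : p j = true := by simp [hp]
  have hcnt : (List.range j).countP p = 1 := hc
  have hlen : 2 ≤ ((List.range n).filter p).length := by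
    rw [← List.countP_eq_length_filter]
    have h1 : (List.range (j + 1)).countP p ≤ (List.range n).countP p :=
      List.Sublist.countP_le (List.range_sublist.mpr hjn)
    rw [List.range_succ, List.countP_append] at h1
    simp [hpj, hcnt] at h1; omega
  have hg := fabs_getD_filter_range p hjn hpj
  rw [hcnt] at hg
  exact ⟨hlen, hg⟩

-- conversely, a group with ≥ 2 members yields a second occurrence with that key
theorem fabs_second_T (ids : List Int) (n : Nat) {k : Int}
    (hk : 2 ≤ (fabsOcc ids n k).length) :
    (fabsOcc ids n k).getD 1 0 ∈ fabsT ids n ∧ fabsE ids ((fabsOcc ids n k).getD 1 0) = k := by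
  set p : Nat → Bool := fun i => fabsE ids i == k with hp
  have h1 : 1 < ((List.range n).filter p).length := by
    simpa [fabsOcc, hp] using hk
  have hgd : (fabsOcc ids n k).getD 1 0 = ((List.range n).filter p)[1] := by
    show ((List.range n).filter p).getD 1 0 = _
    exact List.getD_eq_getElem _ 0 h1
  set j := ((List.range n).filter p)[1] with hjdef
  have hmem : j ∈ (List.range n).filter p := List.getElem_mem h1
  have hj : j < n ∧ fabsE ids j = k := by
    have := List.mem_filter.mp hmem
    exact ⟨List.mem_range.mp this.1, by simpa [hp] using this.2⟩
  have hcnt : (List.range j).countP p = 1 := fabs_countP_range_getElem p h1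
  refine hgd ▸ ⟨(fabs_mem_T ids n j).mpr ⟨hj.1, ?_⟩, hj.2⟩
  have : (fun i => fabsE ids i == fabsE ids j) = p := by
    funext i; simp [hp, hj.2]
  rw [fabsCnt, this, hcnt]

-- the key map is injective on second occurrences
theorem fabs_T_inj (ids : List Int) (n : Nat) {j1 j2 : Nat}
    (h1 : j1 ∈ fabsT ids n) (h2 : j2 ∈ fabsT ids n) (he : fabsE ids j1 = fabsE ids j2) :
    j1 = j2 := by
  have a1 := fabs_T_second ids n h1
  have a2 := fabs_T_second ids n h2
  rw [he] at a1
  omega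

-- the per-key second indices are a permutation of the second occurrences
theorem fabs_perm (ids : List Int) (n : Nat) :
    ((fabsK2 ids n).map (fun k => (fabsOcc ids n k).getD 1 0)).Perm (fabsT ids n) := by
  have hTnd : (fabsT ids n).Nodup :=
    (List.pairwise_lt_range.filter _).imp Nat.ne_of_lt
  have hMnd : ((fabsT ids n).map (fabsE ids)).Nodup :=
    List.Nodup.map_on (fun x hx y hy hxy => fabs_T_inj ids n hx hy hxy) hTnd
  have hKnd : (fabsK2 ids n).Nodup :=
    (PySem.Set.nodup_ofList _).filter _
  have hperm : ((fabsT ids n).map (fabsE ids)).Perm (fabsK2 ids n) := by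
    apply List.perm_of_nodup_nodup_toFinset_eq hMnd hKnd
    ext k
    simp only [List.mem_toFinset, List.mem_map, fabsK2, List.mem_filter,
      PySem.Set.mem_ofList, decide_eq_true_eq]
    constructor
    · rintro ⟨j, hj, rfl⟩
      obtain ⟨hjn, _⟩ := (fabs_mem_T ids n j).mp hj
      exact ⟨⟨j, List.mem_range.mpr hjn, rfl⟩, (fabs_T_second ids n hj).1⟩
    · rintro ⟨_, hk⟩
      obtain ⟨hmem, hkey⟩ := fabs_second_T ids n hk
      exact ⟨_, hmem, hkey⟩
  have hTid : ((fabsT ids n).map (fabsE ids)).map (fun k => (fabsOcc ids n k).getD 1 0)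
      = fabsT ids n := by
    rw [List.map_map]
    calc (fabsT ids n).map ((fun k => (fabsOcc ids n k).getD 1 0) ∘ fabsE ids)
        = (fabsT ids n).map id :=
          List.map_congr_left (fun j hj => (fabs_T_second ids n hj).2)
      _ = fabsT ids n := List.map_id _
  have := (hperm.map (fun k => (fabsOcc ids n k).getD 1 0)).symm
  rw [hTid] at this
  exact this

-- ---- characterisation of port B ----

-- the grouping dict holds, under key c, exactly the indices carrying key c (in order)
theorem fabs_positions_getD (ids : List Int) (n : Nat) (c : Int) :
    ((List.range n).foldl
        (fun d (j : Nat) => PySem.Dict.modify d (ids.getD j 0) [] (fun l => l ++ [(j : Int)]))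
        PySem.Dict.empty).getD c []
      = (fabsOcc ids n c).map (fun j : Nat => (j : Int)) := by
  have h := PySem.Dict.getD_foldl_modify_append
      ((List.range n).map (fun j : Nat => (ids.getD j 0, (j : Int)))) PySem.Dict.empty c
  rw [List.foldl_map] at h
  dsimp only at h
  rw [h, PySem.Dict.getD_empty, List.nil_append, List.filter_map, List.map_map]
  simp [fabsOcc, fabsE, Function.comp_def]

theorem fabs_positions_keys (ids : List Int) (n : Nat) :
    ((List.range n).foldl
        (fun d (j : Nat) => PySem.Dict.modify d (ids.getD j 0) [] (fun l => l ++ [(j : Int)]))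
        PySem.Dict.empty).keys
      = PySem.Set.ofList ((List.range n).map (fabsE ids)) := by
  rw [PySem.Dict.keys_foldl_modify_key (List.range n) (fun j : Nat => ids.getD j 0) []
    (fun _ j => fun l => l ++ [(j : Int)]) PySem.Dict.empty]
  have he : (fun j : Nat => ids.getD j 0) = fabsE ids := by funext j; rfl
  rw [he]
  simp [PySem.Dict.keys_empty, PySem.Set.update, ← PySem.Set.ofList_eq_foldl]

theorem fabs_positions_nodup (ids : List Int) (n : Nat) :
    ((List.range n).foldl
        (fun d (j : Nat) => PySem.Dict.modify d (ids.getD j 0) [] (fun l => l ++ [(j : Int)]))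
        PySem.Dict.empty).keys.Nodup :=
  PySem.Dict.nodup_keys_foldl_modify_key (List.range n) (fun j : Nat => ids.getD j 0) []
    (fun _ j => fun l => l ++ [(j : Int)]) PySem.Dict.empty
    (by simp [PySem.Dict.keys_empty])

theorem fabs_alt_char (answers ids : List Int) :
    filter_all_but_second_alt answers ids
      = (fabsT ids answers.length).map (fun j => answers.getD j 0) := by
  unfold filter_all_but_second_alt
  rw [PySem.List.pyRange_zero_natCast, List.foldl_map]
  simp only [fabsAltStep, PySem.List.pyGetD_natCast]
  rw [PySem.Dict.values_eq_map_keys _ (fabs_positions_nodup ids answers.length) [],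
    fabs_positions_keys, List.filter_map, List.map_map]
  have hpred : ((fun idxs => decide (2 ≤ List.length idxs)) ∘
      (fun k => ((List.range answers.length).foldl
        (fun d (j : Nat) => PySem.Dict.modify d (ids.getD j 0) [] (fun l => l ++ [(j : Int)]))
        PySem.Dict.empty).getD k []))
      = (fun k => decide (2 ≤ (fabsOcc ids answers.length k).length)) := by
    funext k
    simp only [Function.comp_def, fabs_positions_getD ids answers.length k, List.length_map]
  rw [hpred]
  have harg : (((PySem.Set.ofList ((List.range answers.length).map (fabsE ids))).filter
        (fun k => decide (2 ≤ (fabsOcc ids answers.length k).length))).map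
        ((fun idxs => PySem.List.pyGetD idxs 1 0) ∘
          (fun k => ((List.range answers.length).foldl
            (fun d (j : Nat) => PySem.Dict.modify d (ids.getD j 0) [] (fun l => l ++ [(j : Int)]))
            PySem.Dict.empty).getD k [])))
      = (fabsK2 ids answers.length).map
          (fun k => (((fabsOcc ids answers.length k).getD 1 0 : Nat) : Int)) := by
    unfold fabsK2
    apply List.map_congr_left
    intro k _
    simp only [Function.comp_def, fabs_positions_getD ids answers.length k]
    have hm := PySem.List.pyGetD_map (fun j : Nat => (j : Int)) (fabsOcc ids answers.length k) 1 0
    simp only [Nat.cast_zero] at hm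
    rw [hm, PySem.List.pyGetD_ofNat']
  rw [harg]
  have hsorted : PySem.List.sorted ((fabsK2 ids answers.length).map
        (fun k => (((fabsOcc ids answers.length k).getD 1 0 : Nat) : Int))) (fun x => x)
      = (fabsT ids answers.length).map (fun j : Nat => (j : Int)) := by
    apply PySem.List.sorted_eq_of_perm_of_pairwise_lt
    · have h := (fabs_perm ids answers.length).map (fun j : Nat => (j : Int))
      rw [List.map_map] at h
      exact h.symm
    · exact (List.pairwise_lt_range.filter _).map _ (fun a b hab => by exact_mod_cast hab)
  rw [hsorted, List.map_map]
  apply List.map_congr_left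
  intro j _
  simp [PySem.List.pyGetD_natCast]

-- ---- characterisation of port A (via an intermediate counting fold) ----

def fabsStepC (answers : List Int) (exercise_ids : List Int)
    (st : PySem.Dict Int Int × List Int) (i : Int) : PySem.Dict Int Int × List Int :=
  let eid := PySem.List.pyGetD exercise_ids i 0
  let c := st.1.getD eid 0
  let ret := if c = 1 then st.2 ++ [PySem.List.pyGetD answers i 0] else st.2
  (st.1.insert eid (c + 1), ret)

def fabsC (answers : List Int) (exercise_ids : List Int) : List Int :=
  ((PySem.List.pyRange 0 (answers.length : Int) 1).foldl
    (fabsStepC answers exercise_ids) (PySem.Dict.empty, [])).2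

-- invariant tying A's two membership lists to the counting fold
def fabsInv (proc twice : List Int) (seen : PySem.Dict Int Int) : Prop :=
  ∀ x : Int, (x ∈ proc ↔ 1 ≤ seen.getD x 0) ∧
             (x ∈ twice ↔ 2 ≤ seen.getD x 0) ∧
             0 ≤ seen.getD x 0

theorem fabs_loop_eq (answers exercise_ids : List Int) :
    ∀ (l : List Int) (proc twice : List Int) (seen : PySem.Dict Int Int) (acc : List Int),
    fabsInv proc twice seen →
    (l.foldl (fabsStepA answers exercise_ids) (proc, twice, acc)).2.2 =
    (l.foldl (fabsStepC answers exercise_ids) (seen, acc)).2 := by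
  intro l
  induction l with
  | nil => intro _ _ _ _ _; rfl
  | cons i l ih =>
    intro proc twice seen acc hInv
    simp only [List.foldl_cons]
    set eid := PySem.List.pyGetD exercise_ids i 0 with heid
    obtain ⟨h1, h2, h0⟩ := hInv eid
    by_cases hp : eid ∈ proc
    · by_cases ht : eid ∈ twice
      · have hc : 2 ≤ seen.getD eid 0 := h2.mp ht
        have hne : ¬ seen.getD eid 0 = 1 := by omega
        have hStepA : fabsStepA answers exercise_ids (proc, twice, acc) i = (proc, twice, acc) := by
          simp [fabsStepA, ← heid, hp, ht]
        have hStepC : fabsStepC answers exercise_ids (seen, acc) i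
            = (seen.insert eid (seen.getD eid 0 + 1), acc) := by
          simp [fabsStepC, ← heid, hne]
        rw [hStepA, hStepC]
        apply ih
        intro x
        obtain ⟨g1, g2, g0⟩ := hInv x
        by_cases hx : x = eid
        · subst hx
          rw [PySem.Dict.getD_insert_self]
          exact ⟨⟨fun _ => by omega, fun _ => hp⟩, ⟨fun _ => by omega, fun _ => ht⟩, by omega⟩
        · rw [PySem.Dict.getD_insert_of_ne seen _ _ hx]
          exact ⟨g1, g2, g0⟩
      · have hc1 : 1 ≤ seen.getD eid 0 := h1.mp hp
        have hc2 : ¬ 2 ≤ seen.getD eid 0 := fun h => ht (h2.mpr h)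
        have hc : seen.getD eid 0 = 1 := by omega
        have hStepA : fabsStepA answers exercise_ids (proc, twice, acc) i
            = (proc, twice ++ [eid], acc ++ [PySem.List.pyGetD answers i 0]) := by
          simp [fabsStepA, ← heid, hp, ht]
        have hStepC : fabsStepC answers exercise_ids (seen, acc) i
            = (seen.insert eid 2, acc ++ [PySem.List.pyGetD answers i 0]) := by
          simp [fabsStepC, ← heid, hc]
        rw [hStepA, hStepC]
        apply ih
        intro x
        obtain ⟨g1, g2, g0⟩ := hInv x
        by_cases hx : x = eid
        · subst hx
          rw [PySem.Dict.getD_insert_self]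
          refine ⟨⟨fun _ => by omega, fun _ => hp⟩, ⟨fun _ => by omega,
            fun _ => List.mem_append.mpr (Or.inr (List.mem_singleton.mpr rfl))⟩, by omega⟩
        · rw [PySem.Dict.getD_insert_of_ne seen _ _ hx]
          refine ⟨g1, ?_, g0⟩
          rw [List.mem_append, List.mem_singleton]
          exact ⟨fun h => g2.mp (h.resolve_right hx), fun h => Or.inl (g2.mpr h)⟩
    · have hc0 : ¬ 1 ≤ seen.getD eid 0 := fun h => hp (h1.mpr h)
      have hc : seen.getD eid 0 = 0 := by omega
      have hStepA : fabsStepA answers exercise_ids (proc, twice, acc) i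
          = (proc ++ [eid], twice, acc) := by
        simp [fabsStepA, ← heid, hp]
      have hStepC : fabsStepC answers exercise_ids (seen, acc) i
          = (seen.insert eid 1, acc) := by
        simp [fabsStepC, ← heid, hc]
      rw [hStepA, hStepC]
      apply ih
      intro x
      obtain ⟨g1, g2, g0⟩ := hInv x
      by_cases hx : x = eid
      · subst hx
        rw [PySem.Dict.getD_insert_self]
        refine ⟨⟨fun _ => by omega,
          fun _ => List.mem_append.mpr (Or.inr (List.mem_singleton.mpr rfl))⟩,
          ⟨fun h => absurd (g2.mp h) (by omega), fun h => by omega⟩, by omega⟩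
      · rw [PySem.Dict.getD_insert_of_ne seen _ _ hx]
        refine ⟨?_, g2, g0⟩
        rw [List.mem_append, List.mem_singleton]
        exact ⟨fun h => g1.mp (h.resolve_right hx), fun h => Or.inl (g1.mpr h)⟩

theorem fabs_A_eq_C (answers ids : List Int) :
    filter_all_but_second answers ids = fabsC answers ids := by
  unfold filter_all_but_second fabsC
  exact fabs_loop_eq answers ids _ [] [] PySem.Dict.empty []
    (by intro x; simp [PySem.Dict.getD_empty])

theorem fabs_C_loop (answers ids : List Int) (k : Nat) :
    (List.range k).foldl (fun st (j : Nat) => fabsStepC answers ids st (j : Int)) (PySem.Dict.empty, [])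
      = (((List.range k).map (fabsE ids)).foldl
            (fun d x => d.insert x (d.getD x 0 + 1)) PySem.Dict.empty,
         (fabsT ids k).map (fun j => answers.getD j 0)) := by
  induction k with
  | zero => simp [fabsT]
  | succ k ih =>
    rw [List.range_succ, List.foldl_append, ih]
    have hc : (((List.range k).map (fabsE ids)).foldl
        (fun d x => d.insert x (d.getD x 0 + 1)) PySem.Dict.empty).getD (fabsE ids k) 0
        = ((fabsCnt ids k : Nat) : Int) := by
      rw [PySem.Dict.getD_foldl_insert_add_one]
      simp [PySem.Dict.getD_empty, fabsCnt, List.count, List.countP_map, Function.comp_def]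
    have heid : PySem.List.pyGetD ids (↑k) 0 = fabsE ids k :=
      PySem.List.pyGetD_natCast ids k 0
    have hTk : fabsT ids (k + 1)
        = fabsT ids k ++ (if fabsCnt ids k = 1 then [k] else []) := by
      unfold fabsT
      rw [List.range_succ, List.filter_append]
      by_cases h : fabsCnt ids k = 1 <;> simp [h]
    simp only [List.foldl_cons, List.foldl_nil, fabsStepC, heid, hc, List.map_append,
      List.foldl_append, hTk]
    by_cases h : fabsCnt ids k = 1
    · have h' : ((fabsCnt ids k : Nat) : Int) = 1 := by exact_mod_cast h
      simp [h, hc, PySem.List.pyGetD_natCast]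
    · have : ¬ ((fabsCnt ids k : Nat) : Int) = 1 := by exact_mod_cast h
      simp [h, this, hc]

theorem fabs_C_char (answers ids : List Int) :
    fabsC answers ids = (fabsT ids answers.length).map (fun j => answers.getD j 0) := by
  unfold fabsC
  rw [PySem.List.pyRange_zero_natCast, List.foldl_map, fabs_C_loop]

-- ===== VERDICT (by name: the statement is the Claim_ definition above) =====
theorem filter_all_but_second_spec : Claim_equal_filter_all_but_second := by
  intro answers exercise_ids _ _
  unfold Spec_filter_all_but_second
  rw [fabs_A_eq_C, fabs_C_char, fabs_alt_char]
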